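-- pv_equiv track=rewrite | github.com/MuugMuugMuug/AdventOfCode | 12/solution.py | count_joining_chars
-- ===== SOURCE A (Python) =====
-- def count_joining_chars(input_string, ch='#'):
--     counts = []
--     current_count = 0
--
--     for char in input_string:
--         if char == ch:
--             current_count += 1
--         elif current_count > 0:
--             counts.append(current_count)
--             current_count = 0
--
--     if current_count > 0:
--         counts.append(current_count)
--
--     return counts
-- ===== SOURCE B (Python) =====
-- def count_joining_chars(input_string, ch='#'):
--     # Phase 1: split the string into maximal runs as (character, run length) pairs.
--     runs = []
--     i, n = 0, len(input_string)
--     while i < n: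
--         j = i + 1
--         while j < n and input_string[j] == input_string[i]:
--             j += 1
--         runs.append((input_string[i], j - i))
--         i = j
--     # Phase 2: keep the lengths of runs whose character is ch.
--     return [length for key, length in runs if key == ch]
-- ===== Notes on version B (the rewrite author's own statement) =====
-- stated objective: alternative
-- what changed: B first splits the string into maximal (char, run-length) runs and then filters the run list by key, instead of A's single accumulator state machine with a reset branch and a trailing flush.
import Mathlib
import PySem

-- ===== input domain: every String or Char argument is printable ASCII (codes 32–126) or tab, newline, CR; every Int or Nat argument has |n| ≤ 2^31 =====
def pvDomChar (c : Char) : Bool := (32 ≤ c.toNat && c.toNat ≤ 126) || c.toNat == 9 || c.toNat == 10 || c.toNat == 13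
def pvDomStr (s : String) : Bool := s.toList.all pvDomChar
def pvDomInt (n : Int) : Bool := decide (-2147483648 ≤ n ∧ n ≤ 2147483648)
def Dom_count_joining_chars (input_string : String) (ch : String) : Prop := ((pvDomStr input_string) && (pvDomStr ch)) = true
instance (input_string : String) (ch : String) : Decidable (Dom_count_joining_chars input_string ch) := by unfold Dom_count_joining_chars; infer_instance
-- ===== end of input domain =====

-- B replaces A's running-count state machine by a runs-then-filter decomposition (alternative, same cost).

-- ===== PORT A =====
-- the for-loop of A, threading (counts, current_count) exactly as A does
def cjcLoopA (ch : String) : List Char → List Int → Int → List Int × Int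
  | [], counts, cur => (counts, cur)
  | c :: rest, counts, cur =>
    if String.ofList [c] = ch then cjcLoopA ch rest counts (cur + 1)
    else if cur > 0 then cjcLoopA ch rest (counts ++ [cur]) 0
    else cjcLoopA ch rest counts cur

def count_joining_chars (input_string : String) (ch : String) : List Int :=
  let st := cjcLoopA ch input_string.toList [] 0
  if st.2 > 0 then st.1 ++ [st.2] else st.1

-- ===== PORT B =====
-- phase 1 of B: the maximal runs of the string as (char, length) pairs
def cjcRuns : List Char → List (Char × Int)
  | [] => []
  | c :: rest =>
    (c, 1 + (rest.takeWhile (· = c)).length) :: cjcRuns (rest.dropWhile (· = c))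
termination_by l => l.length
decreasing_by
  simpa using Nat.lt_succ_of_le (List.length_dropWhile_le (· = c) rest)

def count_joining_chars_alt (input_string : String) (ch : String) : List Int :=
  (cjcRuns input_string.toList).filterMap
    (fun p => if String.ofList [p.1] = ch then some p.2 else none)

-- ===== PRECONDITION & SPEC =====
def Spec_count_joining_chars (input_string : String) (ch : String) (out : List Int) : Prop := out = count_joining_chars_alt input_string ch
instance (input_string : String) (ch : String) (out : List Int) : Decidable (Spec_count_joining_chars input_string ch out) := by unfold Spec_count_joining_chars; infer_instance

-- ===== CLAIM (what is proved, stated in full; the proofs are below) =====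
def Claim_equal_count_joining_chars : Prop := ∀ (input_string : String) (ch : String), Dom_count_joining_chars input_string ch → Spec_count_joining_chars input_string ch (count_joining_chars input_string ch)

-- ===== LEMMAS AND PROOFS =====

-- the value A's finished loop produces, as a structural function of the remaining input and current count
def cjcG (ch : String) : List Char → Int → List Int
  | [], cur => if cur > 0 then [cur] else []
  | c :: rest, cur =>
    if String.ofList [c] = ch then cjcG ch rest (cur + 1)
    else if cur > 0 then cur :: cjcG ch rest 0
    else cjcG ch rest cur

theorem cjcLoopA_eq_G (ch : String) (l : List Char) : ∀ (counts : List Int) (cur : Int),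
    (let st := cjcLoopA ch l counts cur; if st.2 > 0 then st.1 ++ [st.2] else st.1)
      = counts ++ cjcG ch l cur := by
  induction l with
  | nil =>
    intro counts cur
    simp only [cjcLoopA, cjcG]
    split <;> simp
  | cons c rest ih =>
    intro counts cur
    simp only [cjcLoopA, cjcG]
    by_cases h1 : String.ofList [c] = ch
    · simp [h1, ih]
    · by_cases h2 : cur > 0
      · simp [h1, h2, ih]
      · simp [h1, h2, ih]

-- single-character strings are equal iff the characters are
theorem cjcOfList_inj (x y : Char) (h : String.ofList [x] = String.ofList [y]) : x = y := by
  have := congrArg String.toList h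
  simpa using this

-- skipping a block of characters all equal to a matching c accumulates the block length
theorem cjcG_run_match (ch : String) (c : Char) (hc : String.ofList [c] = ch) :
    ∀ (t d : List Char), (∀ x ∈ t, x = c) → ∀ cur,
      cjcG ch (t ++ d) cur = cjcG ch d (cur + t.length) := by
  intro t
  induction t with
  | nil => intro d _ cur; simp
  | cons x xs ih =>
    intro d ht cur
    have hx : x = c := ht x (by simp)
    have hxs : ∀ y ∈ xs, y = c := fun y hy => ht y (by simp [hy])
    simp only [List.cons_append, cjcG, hx, hc, if_pos]
    rw [ih d hxs]
    congr 1
    simp only [List.length_cons]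
    push_cast
    ring

-- skipping a block of characters all equal to a non-matching c leaves the state unchanged
theorem cjcG_run_nomatch (ch : String) (c : Char) (hc : ¬ String.ofList [c] = ch) :
    ∀ (t d : List Char), (∀ x ∈ t, x = c) →
      cjcG ch (t ++ d) 0 = cjcG ch d 0 := by
  intro t
  induction t with
  | nil => intro d _; simp
  | cons x xs ih =>
    intro d ht
    have hx : x = c := ht x (by simp)
    have hxs : ∀ y ∈ xs, y = c := fun y hy => ht y (by simp [hy])
    simp only [List.cons_append, cjcG, hx, hc, if_neg, lt_irrefl, not_false_iff]
    simpa using ih d hxs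

theorem cjcG_eq_alt (ch : String) : ∀ (l : List Char),
    cjcG ch l 0 = (cjcRuns l).filterMap
      (fun p => if String.ofList [p.1] = ch then some p.2 else none) := by
  intro l
  induction l using cjcRuns.induct with
  | case1 => simp [cjcG, cjcRuns]
  | case2 c rest ih =>
    have hdec : c :: rest
        = (c :: rest.takeWhile (· = c)) ++ rest.dropWhile (· = c) := by
      simp [List.takeWhile_append_dropWhile]
    have hall : ∀ x ∈ c :: rest.takeWhile (· = c), x = c := by
      intro x hx
      rcases List.mem_cons.mp hx with h | h
      · exact h
      · exact of_decide_eq_true (List.mem_takeWhile_imp (p := fun y => decide (y = c)) (l := rest) h)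
    rw [cjcRuns]
    by_cases h : String.ofList [c] = ch
    · rw [hdec, cjcG_run_match ch c h _ _ hall 0]
      have hpos : (0 : Int) + (((c :: rest.takeWhile (· = c)).length : ℕ) : Int) > 0 := by
        simp only [List.length_cons]; push_cast; positivity
      cases hd : rest.dropWhile (· = c) with
      | nil =>
        rw [hd] at ih
        simp only [cjcG, hpos, if_pos, cjcRuns, List.filterMap_cons, h,
          List.filterMap_nil]
        simp only [List.length_cons]
        push_cast
        congr 1
        ring
      | cons y ys =>
        rw [hd] at ih
        have hy : ¬ (y = c) := by
          have := List.head?_dropWhile_not (p := (· = c)) (l := rest)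
          rw [hd] at this
          simpa using this
        have hy' : ¬ String.ofList [y] = ch := fun hcon =>
          hy (cjcOfList_inj y c (hcon.trans h.symm))
        rw [cjcG]
        simp only [hy', if_neg, not_false_iff, hpos, if_pos]
        have hstep : cjcG ch ys 0 = cjcG ch (y :: ys) 0 := by
          rw [cjcG]; simp [hy']
        rw [hstep, ih]
        simp only [List.filterMap_cons, h, if_pos]
        congr 1
        simp only [List.length_cons]
        push_cast
        ring
    · rw [hdec, cjcG_run_nomatch ch c h _ _ hall]
      simp only [List.filterMap_cons, h, if_neg, not_false_iff]
      exact ih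

-- ===== VERDICT (by name: the statement is the Claim_ definition above) =====
theorem count_joining_chars_spec : Claim_equal_count_joining_chars := by
  intro s ch _
  unfold Spec_count_joining_chars count_joining_chars count_joining_chars_alt
  rw [cjcLoopA_eq_G, cjcG_eq_alt]
  simp
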